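-- pv_equiv track=rewrite | github.com/Skantastico/cs-module-project-hash-tables | applications/crack_caesar/crack_caesar.py | caesarkey
-- ===== SOURCE A (Python) =====
-- def count_letters(s):
--     dict = {}
--     letters = [l.upper() for l in s if l.isalpha()]
--     for letter in letters:
--         dict[letter] = dict[letter] + 1 if letter in dict else 1
--     return dict
--
-- def caesarkey(ciphertext):
--     letters = ['E', 'T', 'A', 'O', 'H', 'N', 'R', 'I', 'S', 'D', 'L', 'W', 'U',
--     'G', 'F', 'B', 'M', 'Y', 'C', 'P', 'K', 'V', 'Q', 'J', 'X', 'Z']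
--
--     sorted_letters = sorted(count_letters(ciphertext).items(), key=lambda x: x[1], reverse=True)
--     key = {}
--
--     for (i, l) in enumerate(sorted_letters):
--         key[l[0]] = letters[i]
--
--     return key
-- ===== SOURCE B (Python) =====
-- ENGLISH = ['E', 'T', 'A', 'O', 'H', 'N', 'R', 'I', 'S', 'D', 'L', 'W', 'U',
--            'G', 'F', 'B', 'M', 'Y', 'C', 'P', 'K', 'V', 'Q', 'J', 'X', 'Z']
--
-- def caesarkey(ciphertext):
--     # one inline counting pass (insertion order = first appearance)
--     counts = {}
--     for ch in ciphertext:
--         if ch.isalpha():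
--             u = ch.upper()
--             counts[u] = counts.get(u, 0) + 1
--     if not counts:
--         return {}
--     # bucket sort by count instead of a comparison sort
--     m = max(counts.values())
--     buckets = [[] for _ in range(m + 1)]
--     for letter, c in counts.items():
--         buckets[c].append(letter)
--     key = {}
--     i = 0
--     for bucket in reversed(buckets[1:]):
--         for letter in bucket:
--             key[letter] = ENGLISH[i]
--             i += 1
--     return key
-- ===== Notes on version B (the rewrite author's own statement) =====
-- stated objective: alternative
-- what changed: B counts letters in one inline pass and replaces A's comparison sort of the (letter,count) pairs by a bucket sort indexed by count (walking buckets from the highest count down), producing the identical stable ordering.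
import Mathlib
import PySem

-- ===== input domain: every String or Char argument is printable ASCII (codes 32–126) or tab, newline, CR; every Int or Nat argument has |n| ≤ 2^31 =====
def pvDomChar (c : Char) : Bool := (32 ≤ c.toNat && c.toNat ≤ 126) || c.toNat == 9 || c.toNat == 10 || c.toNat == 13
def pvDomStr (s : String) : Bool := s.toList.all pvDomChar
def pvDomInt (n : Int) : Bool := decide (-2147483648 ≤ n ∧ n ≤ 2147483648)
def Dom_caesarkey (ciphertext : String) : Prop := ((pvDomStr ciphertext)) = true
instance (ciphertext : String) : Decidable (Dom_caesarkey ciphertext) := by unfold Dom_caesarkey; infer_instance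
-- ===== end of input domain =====

-- B replaces A's comparison sort of the letter counts by a bucket sort over the counts
-- (objective: alternative decomposition of the same frequency-mapping task, same observable result).

def pvEnglish : List String := ["E", "T", "A", "O", "H", "N", "R", "I", "S", "D", "L", "W", "U",
  "G", "F", "B", "M", "Y", "C", "P", "K", "V", "Q", "J", "X", "Z"]

-- ===== PORT A =====
-- count_letters(s)
def pvCountLetters (s : String) : PySem.Dict String Int :=
  let letters := (s.toList.filter (fun c => PySem.Chars.isalpha c)).map
    (fun c => String.mk [PySem.Chars.upperChar c])
  letters.foldl
    (fun d letter =>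
      if d.contains letter then d.insert letter (d.getD letter 0 + 1) else d.insert letter 1)
    PySem.Dict.empty

def caesarkey (ciphertext : String) : List (String × String) :=
  let letters := pvEnglish
  let sorted_letters := PySem.List.sorted (pvCountLetters ciphertext).items (fun x => x.2) true
  -- letters[i]: the index is always in range in executions A's Python reaches (≤ 26 distinct letters)
  let key := (PySem.List.enumerate sorted_letters).foldl
    (fun d p => d.insert p.2.1 (PySem.List.pyGetD letters p.1 ""))
    PySem.Dict.empty
  key.items

-- ===== PORT B =====
def caesarkey_alt (ciphertext : String) : List (String × String) :=
  let counts := ciphertext.toList.foldl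
    (fun d c =>
      if PySem.Chars.isalpha c then
        let u := String.mk [PySem.Chars.upperChar c]
        d.insert u (d.getD u 0 + 1)
      else d)
    (PySem.Dict.empty : PySem.Dict String Int)
  if counts.items.isEmpty then []
  else
    let m := ((PySem.List.max? counts.values (fun v => v)).getD 0).toNat
    let buckets := counts.items.foldl
      (fun bs p => bs.set p.2.toNat (bs.getD p.2.toNat [] ++ [p.1]))
      (List.replicate (m + 1) ([] : List String))
    let st := ((buckets.drop 1).reverse).foldl
      (fun (st : PySem.Dict String String × Int) bucket =>
        bucket.foldl
          (fun st letter => (st.1.insert letter (PySem.List.pyGetD pvEnglish st.2 ""), st.2 + 1))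
          st)
      ((PySem.Dict.empty : PySem.Dict String String), (0 : Int))
    st.1.items

-- ===== PRECONDITION & SPEC =====
def Spec_caesarkey (ciphertext : String) (out : List (String × String)) : Prop := out = caesarkey_alt ciphertext
instance (ciphertext : String) (out : List (String × String)) : Decidable (Spec_caesarkey ciphertext out) := by unfold Spec_caesarkey; infer_instance

-- ===== CLAIM (what is proved, stated in full; the proofs are below) =====
def Claim_equal_caesarkey : Prop := ∀ (ciphertext : String), Dom_caesarkey ciphertext → Spec_caesarkey ciphertext (caesarkey ciphertext)

-- ===== LEMMAS AND PROOFS =====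

-- the uppercased alphabetic letters of s, as 1-char strings (shared vocabulary of the two ports)
def pvLetters (s : String) : List String :=
  (s.toList.filter (fun c => PySem.Chars.isalpha c)).map (fun c => String.mk [PySem.Chars.upperChar c])

-- the descending list of counts m, m-1, …, 1
def pvDesc : Nat → List Int
  | 0 => []
  | n + 1 => ((n + 1 : Nat) : Int) :: pvDesc n

lemma mem_pvDesc (n : Nat) (c : Int) : c ∈ pvDesc n ↔ 1 ≤ c ∧ c ≤ (n : Int) := by
  induction n with
  | zero => simp [pvDesc]; omega
  | succ k ih => simp [pvDesc, ih]; omega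

lemma pairwise_pvDesc (n : Nat) : (pvDesc n).Pairwise (· > ·) := by
  induction n with
  | zero => simp [pvDesc]
  | succ k ih =>
    refine List.Pairwise.cons ?_ ih
    intro c hc
    rcases (mem_pvDesc k c).1 hc with ⟨h1, h2⟩
    push_cast; omega

lemma pvDesc_eq_range' (n : Nat) :
    pvDesc n = ((List.range' 1 n).reverse).map (fun (c : Nat) => (c : Int)) := by
  induction n with
  | zero => simp [pvDesc]
  | succ k ih =>
    simp only [pvDesc, List.range'_1_concat, List.reverse_append, List.reverse_singleton,
      List.singleton_append, ih]
    congr 1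
    push_cast; ring

-- A's counting dict is the counter of pvLetters
lemma countsA_eq (s : String) : pvCountLetters s = PySem.Dict.counter (pvLetters s) := by
  rw [← PySem.Dict.foldl_insert_getD_add_one_eq_counter]
  unfold pvCountLetters pvLetters
  refine PySem.List.foldl_congr_mem _ _ _ _ ?_
  intro d letter _
  by_cases h : d.contains letter
  · simp [h]
  · have h' : d.contains letter = false := by simpa using h
    simp [h', PySem.Dict.getD_of_not_contains d (0 : Int) h']

-- B's counting dict is the counter of pvLetters
lemma countsB_eq (s : String) :
    s.toList.foldl
      (fun d c =>
        if PySem.Chars.isalpha c then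
          let u := String.mk [PySem.Chars.upperChar c]
          d.insert u (d.getD u 0 + 1)
        else d)
      PySem.Dict.empty = PySem.Dict.counter (pvLetters s) := by
  rw [← PySem.Dict.foldl_insert_getD_add_one_eq_counter]
  unfold pvLetters
  rw [List.foldl_map, List.foldl_filter]

-- insertBy into a bucket-decomposed list keeps the bucket decomposition
lemma insertBy_append {α : Type} (before : α → α → Bool) (x : α) (us vs : List α)
    (h : ∀ u ∈ us, before x u = false) :
    PySem.List.insertBy before x (us ++ vs) = us ++ PySem.List.insertBy before x vs := by
  induction us with
  | nil => simp
  | cons u us ih =>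
    simp only [List.cons_append, PySem.List.insertBy, h u (by simp)]
    simp only [Bool.false_eq_true, if_false]
    rw [ih (fun u hu => h u (by simp [hu]))]

lemma insertBy_cons_of_before {α : Type} (before : α → α → Bool) (x : α) (ys : List α)
    (h : ∀ y ∈ ys, before x y = true) :
    PySem.List.insertBy before x ys = x :: ys := by
  cases ys with
  | nil => simp [PySem.List.insertBy]
  | cons y ys => simp [PySem.List.insertBy, h y (by simp)]

lemma flatMap_filter_key_eq {α : Type} (key : α → Int) (cs : List Int) (l : List α) (x : α)
    (hx : key x ∉ cs) :
    cs.flatMap (fun c => (l ++ [x]).filter (fun y => key y == c)) =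
      cs.flatMap (fun c => l.filter (fun y => key y == c)) := by
  induction cs with
  | nil => simp
  | cons c cs ih =>
    rw [List.flatMap_cons, List.flatMap_cons, ih (fun h => hx (List.mem_cons_of_mem _ h))]
    have hxc : (key x == c) = false := by
      simp only [beq_eq_false_iff_ne, ne_eq]
      intro h; exact hx (by simp [h])
    rw [List.filter_append]
    simp [hxc]

lemma insertBy_flatMap (key : α → Int) (cs : List Int) (hcs : cs.Pairwise (· > ·))
    (l : List α) (x : α) (hx : key x ∈ cs) :
    PySem.List.insertBy (fun a b => decide (key b < key a)) x
        (cs.flatMap (fun c => l.filter (fun y => key y == c))) =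
      cs.flatMap (fun c => (l ++ [x]).filter (fun y => key y == c)) := by
  induction cs with
  | nil => exact absurd hx (by simp)
  | cons c cs ih =>
    rcases List.pairwise_cons.1 hcs with ⟨hhead, htail⟩
    have hmemc : ∀ y ∈ l.filter (fun y => key y == c), key y = c := by
      intro y hy
      exact eq_of_beq (List.mem_filter.1 hy).2
    simp only [List.flatMap_cons]
    by_cases hxc : key x = c
    · -- x belongs to the first bucket: it goes after that bucket, before everything lower
      have h1 : ∀ y ∈ l.filter (fun y => key y == c), decide (key y < key x) = false := by
        intro y hy
        simp [hmemc y hy, hxc]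
      have h2 : ∀ y ∈ cs.flatMap (fun c' => l.filter (fun y => key y == c')),
          decide (key y < key x) = true := by
        intro y hy
        rcases List.mem_flatMap.1 hy with ⟨c', hc', hyf⟩
        have : key y = c' := eq_of_beq (List.mem_filter.1 hyf).2
        have : key y < c := by rw [this]; exact hhead c' hc'
        simp [hxc, this]
      rw [insertBy_append _ _ _ _ h1, insertBy_cons_of_before _ _ _ h2]
      have hnot : key x ∉ cs := by
        intro h
        exact absurd (hxc ▸ hhead _ h) (lt_irrefl _)
      rw [flatMap_filter_key_eq key cs l x hnot, List.filter_append]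
      have : [x].filter (fun y => key y == c) = [x] := by simp [hxc]
      rw [this, List.append_assoc, List.singleton_append]
    · have hx' : key x ∈ cs := by
        rcases List.mem_cons.1 hx with h | h
        · exact absurd h hxc
        · exact h
      have h1 : ∀ y ∈ l.filter (fun y => key y == c), decide (key y < key x) = false := by
        intro y hy
        have hklt : key x < c := hhead _ hx'
        simp only [decide_eq_false_iff_not, not_lt, hmemc y hy]
        omega
      rw [insertBy_append _ _ _ _ h1, ih htail hx', List.filter_append]
      have : [x].filter (fun y => key y == c) = [] := by simp [hxc]
      rw [this, List.append_nil]

-- the stable reverse sort is the concatenation of the buckets, highest count first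
lemma sorted_rev_eq_flatMap {α : Type} (key : α → Int) (cs : List Int) (hcs : cs.Pairwise (· > ·))
    (l : List α) (hl : ∀ y ∈ l, key y ∈ cs) :
    PySem.List.sorted l key true = cs.flatMap (fun c => l.filter (fun y => key y == c)) := by
  induction l using List.reverseRecOn with
  | nil =>
    have h1 : PySem.List.sorted ([] : List α) key true = [] := rfl
    simp [h1]
  | append_singleton l x ih =>
    rw [PySem.List.sorted_rev_eq_foldl_insertBy, List.foldl_append, List.foldl_cons, List.foldl_nil,
      ← PySem.List.sorted_rev_eq_foldl_insertBy,
      ih (fun y hy => hl y (by simp [hy]))]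
    exact insertBy_flatMap key cs hcs l x (hl x (by simp))

-- the bucket-filling fold, characterised pointwise
lemma bucketFold_length (l : List (String × Int)) (bs : List (List String)) :
    (l.foldl (fun bs p => bs.set p.2.toNat (bs.getD p.2.toNat [] ++ [p.1])) bs).length
      = bs.length := by
  induction l generalizing bs with
  | nil => rfl
  | cons p l ih => rw [List.foldl_cons, ih, List.length_set]

lemma bucketFold_getD (l : List (String × Int)) (bs : List (List String)) (c : Nat)
    (hv : ∀ p ∈ l, 1 ≤ p.2 ∧ p.2.toNat < bs.length) :
    (l.foldl (fun bs p => bs.set p.2.toNat (bs.getD p.2.toNat [] ++ [p.1])) bs).getD c []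
      = bs.getD c [] ++ (l.filter (fun p => p.2 == (c : Int))).map (·.1) := by
  induction l generalizing bs with
  | nil => simp
  | cons p l ih =>
    obtain ⟨hp1, hp2⟩ := hv p (List.mem_cons_self ..)
    rw [List.foldl_cons, ih _ (fun q hq => by
      have := hv q (List.mem_cons_of_mem _ hq)
      simpa [List.length_set] using this)]
    rw [List.filter_cons]
    by_cases hc : p.2.toNat = c
    · have hpc : (p.2 == (c : Int)) = true := by
        simp only [beq_iff_eq]; omega
      have hset : (bs.set p.2.toNat (bs.getD p.2.toNat [] ++ [p.1])).getD c []
          = bs.getD c [] ++ [p.1] := by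
        subst hc
        rw [List.getD_eq_getElem?_getD, List.getElem?_set_self hp2]
        simp [List.getD_eq_getElem?_getD]
      rw [hset, hpc]
      simp
    · have hpc : (p.2 == (c : Int)) = false := by
        simp only [beq_eq_false_iff_ne, ne_eq]; omega
      have hset : (bs.set p.2.toNat (bs.getD p.2.toNat [] ++ [p.1])).getD c []
          = bs.getD c [] := by
        rw [List.getD_eq_getElem?_getD, List.getElem?_set_ne hc, ← List.getD_eq_getElem?_getD]
      rw [hset, hpc]
      simp

lemma enumerate_map {α β : Type} (f : α → β) (xs : List α) (s : Int) :
    PySem.List.enumerate (xs.map f) s = (PySem.List.enumerate xs s).map (fun p => (p.1, f p.2)) := by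
  induction xs generalizing s with
  | nil => rfl
  | cons x xs ih => simp [PySem.List.enumerate_cons, ih]

-- B's assignment loop, expressed over the enumerated flat list
lemma assignFold (xs : List String) (d : PySem.Dict String String) (i0 : Int) :
    (xs.foldl
        (fun st letter => (st.1.insert letter (PySem.List.pyGetD pvEnglish st.2 ""), st.2 + 1))
        (d, i0)).1
      = (PySem.List.enumerate xs i0).foldl
          (fun d p => d.insert p.2 (PySem.List.pyGetD pvEnglish p.1 "")) d := by
  induction xs generalizing d i0 with
  | nil => rfl
  | cons x xs ih => simp [PySem.List.enumerate_cons, ih]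

-- the common letter multiset, deduplicated in first-appearance order
lemma items_counter_letters (s : String) :
    (PySem.Dict.counter (pvLetters s)).items
      = (PySem.Set.ofList (pvLetters s)).map
          (fun k => (k, ((pvLetters s).count k : Int))) :=
  PySem.Dict.items_counter (pvLetters s)

-- A's assignment dict over nodup keys, as a plain map
lemma out_items (ys : List (String × Int)) (hnd : (ys.map (·.1)).Nodup) :
    ((PySem.List.enumerate ys 0).foldl
        (fun d p => d.insert p.2.1 (PySem.List.pyGetD pvEnglish p.1 ""))
        (PySem.Dict.empty : PySem.Dict String String)).items
      = (PySem.List.enumerate ys 0).map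
          (fun p => (p.2.1, PySem.List.pyGetD pvEnglish p.1 "")) := by
  have hmap : (PySem.List.enumerate ys 0).map (fun p => p.2.1) = ys.map (·.1) := by
    have : (fun p : Int × (String × Int) => p.2.1)
        = (fun x : String × Int => x.1) ∘ (fun p : Int × (String × Int) => p.2) := rfl
    rw [this, ← List.map_map, PySem.List.map_snd_enumerate]
  have h := PySem.Dict.items_foldl_insert_fresh (PySem.List.enumerate ys 0)
    (fun p => p.2.1) (fun p => PySem.List.pyGetD pvEnglish p.1 "")
    (PySem.Dict.empty : PySem.Dict String String)
    (fun a _ => PySem.Dict.contains_empty _) (by rw [hmap]; exact hnd)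
  simpa using h

-- B's assignment dict over nodup keys, as a plain map
lemma out_items_alt (xs : List String) (hnd : xs.Nodup) :
    ((PySem.List.enumerate xs 0).foldl
        (fun d p => d.insert p.2 (PySem.List.pyGetD pvEnglish p.1 ""))
        (PySem.Dict.empty : PySem.Dict String String)).items
      = (PySem.List.enumerate xs 0).map
          (fun p => (p.2, PySem.List.pyGetD pvEnglish p.1 "")) := by
  have hmap : (PySem.List.enumerate xs 0).map (fun p => p.2) = xs :=
    PySem.List.map_snd_enumerate xs 0
  have h := PySem.Dict.items_foldl_insert_fresh (PySem.List.enumerate xs 0)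
    (fun p => p.2) (fun p => PySem.List.pyGetD pvEnglish p.1 "")
    (PySem.Dict.empty : PySem.Dict String String)
    (fun a _ => PySem.Dict.contains_empty _) (by rw [hmap]; exact hnd)
  simpa using h

-- enumerating the pairs and projecting = enumerating the projected keys
lemma enum_proj (ys : List (String × Int)) :
    (PySem.List.enumerate ys 0).map (fun p => (p.2.1, PySem.List.pyGetD pvEnglish p.1 ""))
      = (PySem.List.enumerate (ys.map (·.1)) 0).map
          (fun p => (p.2, PySem.List.pyGetD pvEnglish p.1 "")) := by
  rw [enumerate_map, List.map_map]
  rfl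

lemma main_eq (s : String) : caesarkey s = caesarkey_alt s := by
  have hA : pvCountLetters s = PySem.Dict.counter (pvLetters s) := countsA_eq s
  unfold caesarkey caesarkey_alt
  rw [hA, countsB_eq]
  show ((PySem.List.enumerate
      (PySem.List.sorted (PySem.Dict.counter (pvLetters s)).items (fun x => x.2) true) 0).foldl
      (fun d p => d.insert p.2.1 (PySem.List.pyGetD pvEnglish p.1 ""))
      (PySem.Dict.empty : PySem.Dict String String)).items
    = if (PySem.Dict.counter (pvLetters s)).items.isEmpty = true then []
      else
        (((((PySem.Dict.counter (pvLetters s)).items.foldl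
              (fun bs p => bs.set p.2.toNat (bs.getD p.2.toNat [] ++ [p.1]))
              (List.replicate
                ((((PySem.List.max? (PySem.Dict.counter (pvLetters s)).values (fun v => v)).getD 0).toNat) + 1)
                ([] : List String))).drop 1).reverse).foldl
          (fun st bucket =>
            bucket.foldl
              (fun st letter => (st.1.insert letter (PySem.List.pyGetD pvEnglish st.2 ""), st.2 + 1))
              st)
          ((PySem.Dict.empty : PySem.Dict String String), (0 : Int))).1.items
  set l : List (String × Int) := (PySem.Dict.counter (pvLetters s)).items with hldef
  by_cases hl0 : l = []
  · rw [hl0]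
    rfl
  · rw [if_neg (by simp [hl0])]
    -- the values list and the maximum count
    have hvals : (PySem.Dict.counter (pvLetters s)).values = l.map (·.2) := rfl
    have hvne : l.map (·.2) ≠ [] := by simpa using hl0
    obtain ⟨mv, hmv⟩ : ∃ mv, PySem.List.max? (l.map (·.2)) (fun v => v) = some mv := by
      cases h : PySem.List.max? (l.map (·.2)) (fun v => v) with
      | none => exact absurd ((PySem.List.max?_eq_none_iff _ _).1 h) hvne
      | some mv => exact ⟨mv, rfl⟩
    -- each letter occurs at least once, at most mv times
    have hv1 : ∀ p ∈ l, 1 ≤ p.2 := by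
      intro p hp
      rw [hldef, items_counter_letters] at hp
      obtain ⟨k, hk, rfl⟩ := List.mem_map.1 hp
      have : 0 < (pvLetters s).count k :=
        List.count_pos_iff.2 ((PySem.Set.mem_ofList _ _).1 hk)
      simpa using this
    have hvmax : ∀ p ∈ l, p.2 ≤ mv := by
      intro p hp
      exact PySem.List.max?_isMax hmv _ (List.mem_map_of_mem hp)
    have hmv1 : 1 ≤ mv := by
      obtain ⟨p, hp, hpe⟩ := List.mem_map.1 (PySem.List.max?_mem hmv)
      rw [← hpe]; exact hv1 p hp
    have hMcast : ((mv.toNat : Nat) : Int) = mv := Int.toNat_of_nonneg (by omega)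
    rw [hvals, hmv, Option.getD_some]
    -- the buckets, characterised as filters of l
    have hbound : ∀ p ∈ l, 1 ≤ p.2 ∧ p.2.toNat < (List.replicate (mv.toNat + 1) ([] : List String)).length := by
      intro p hp
      refine ⟨hv1 p hp, ?_⟩
      have h2 := hvmax p hp
      rw [List.length_replicate]
      omega
    have hbucket : ∀ c : Nat,
        (l.foldl (fun bs p => bs.set p.2.toNat (bs.getD p.2.toNat [] ++ [p.1]))
          (List.replicate (mv.toNat + 1) ([] : List String))).getD c []
        = (l.filter (fun p => p.2 == (c : Int))).map (·.1) := by
      intro c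
      rw [bucketFold_getD l _ c hbound]
      by_cases hc : c < mv.toNat + 1
      · rw [List.getD_replicate _ hc, List.nil_append]
      · rw [List.getD_eq_default _ _ (by rw [List.length_replicate]; omega), List.nil_append]
    have hblen : (l.foldl (fun bs p => bs.set p.2.toNat (bs.getD p.2.toNat [] ++ [p.1]))
          (List.replicate (mv.toNat + 1) ([] : List String))).length = mv.toNat + 1 := by
      rw [bucketFold_length, List.length_replicate]
    have hbuckets : (l.foldl (fun bs p => bs.set p.2.toNat (bs.getD p.2.toNat [] ++ [p.1]))
          (List.replicate (mv.toNat + 1) ([] : List String)))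
        = (List.range (mv.toNat + 1)).map
            (fun (c : Nat) => (l.filter (fun p => p.2 == (c : Int))).map (·.1)) := by
      apply List.ext_getElem
      · rw [hblen]
        simp
      · intro i h1 h2
        rw [← List.getD_eq_getElem _ [] h1, hbucket i, List.getElem_map, List.getElem_range]
    rw [hbuckets]
    -- drop bucket 0 and reverse: the descending bucket list
    have hdrop : ((List.range (mv.toNat + 1)).map
          (fun (c : Nat) => (l.filter (fun p => p.2 == (c : Int))).map (·.1))).drop 1
        = (List.range' 1 mv.toNat).map
            (fun (c : Nat) => (l.filter (fun p => p.2 == (c : Int))).map (·.1)) := by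
      rw [List.range_eq_range', List.range'_succ, List.map_cons, List.drop_succ_cons, List.drop_zero]
    rw [hdrop, ← List.map_reverse]
    -- B's nested fold = the fold over the flattened key order
    rw [show
      (((List.range' 1 mv.toNat).reverse.map
          (fun (c : Nat) => (l.filter (fun p => p.2 == (c : Int))).map (·.1))).foldl
        (fun st bucket =>
          bucket.foldl
            (fun st letter => (st.1.insert letter (PySem.List.pyGetD pvEnglish st.2 ""), st.2 + 1))
            st)
        ((PySem.Dict.empty : PySem.Dict String String), (0 : Int)))
      = (((List.range' 1 mv.toNat).reverse.map
          (fun (c : Nat) => (l.filter (fun p => p.2 == (c : Int))).map (·.1))).flatten.foldl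
          (fun st letter => (st.1.insert letter (PySem.List.pyGetD pvEnglish st.2 ""), st.2 + 1))
          ((PySem.Dict.empty : PySem.Dict String String), (0 : Int)))
      from (List.foldl_flatten).symm]
    -- the flattened key order is the key projection of A's sorted list
    have hsort : PySem.List.sorted l (fun x => x.2) true
        = (pvDesc mv.toNat).flatMap (fun c => l.filter (fun p => p.2 == c)) := by
      refine sorted_rev_eq_flatMap _ _ (pairwise_pvDesc _) l ?_
      intro p hp
      rw [mem_pvDesc]
      exact ⟨hv1 p hp, by rw [hMcast]; exact hvmax p hp⟩
    have hflat : ((List.range' 1 mv.toNat).reverse.map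
          (fun (c : Nat) => (l.filter (fun p => p.2 == (c : Int))).map (·.1))).flatten
        = (PySem.List.sorted l (fun x => x.2) true).map (·.1) := by
      rw [hsort, List.map_flatMap, pvDesc_eq_range', List.flatMap_map, ← List.flatMap_def]
    rw [hflat]
    -- nodup keys
    have hkeysl : l.map (·.1) = PySem.Set.ofList (pvLetters s) := by
      rw [hldef, items_counter_letters, List.map_map]
      exact List.map_id' _
    have hnodupl : (l.map (·.1)).Nodup := by
      rw [hkeysl]; exact PySem.Set.nodup_ofList _
    have hnodup_ord : ((PySem.List.sorted l (fun x => x.2) true).map (·.1)).Nodup :=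
      ((PySem.List.sorted_perm l (fun x => x.2) true).map _).nodup_iff.2 hnodupl
    -- both sides are the same enumerated map
    rw [assignFold, out_items _ hnodup_ord, out_items_alt _ hnodup_ord, enum_proj]

-- ===== VERDICT (by name: the statement is the Claim_ definition above) =====
theorem caesarkey_spec : Claim_equal_caesarkey := by
  intro s _
  exact main_eq s
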